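-- pv_equiv track=rewrite | github.com/kevinyin9/screener | t.py | find_transition_dates
-- ===== SOURCE A (Python) =====
-- def find_transition_dates(quantities, dates):
--     start_date = end_date = None
--     has_positive = has_negative = False
--     for quantity, date in zip(quantities, dates):
--         if quantity > 0 and not has_positive:
--             has_positive = True
--         elif quantity < 0 and has_positive and not has_negative:
--             has_negative = True
--             start_date = date
--         elif quantity > 0 and has_positive and has_negative:
--             end_date = date
--             break
--     return start_date, end_date
-- ===== SOURCE B (Python) =====
-- def find_transition_dates(quantities, dates):
--     it = iter(zip(quantities, dates))
--     for quantity, date in it: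
--         if quantity > 0:
--             break
--     else:
--         return None, None
--     for quantity, date in it:
--         if quantity < 0:
--             start_date = date
--             break
--     else:
--         return None, None
--     end_date = None
--     for quantity, date in it:
--         if quantity > 0:
--             end_date = date
--             break
--     return start_date, end_date
-- ===== Notes on version B (the rewrite author's own statement) =====
-- stated objective: simpler
-- what changed: Replaced the boolean flag state machine with three sequential phase scans over one shared iterator (find first positive, then first negative, then next positive).
import Mathlib
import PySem

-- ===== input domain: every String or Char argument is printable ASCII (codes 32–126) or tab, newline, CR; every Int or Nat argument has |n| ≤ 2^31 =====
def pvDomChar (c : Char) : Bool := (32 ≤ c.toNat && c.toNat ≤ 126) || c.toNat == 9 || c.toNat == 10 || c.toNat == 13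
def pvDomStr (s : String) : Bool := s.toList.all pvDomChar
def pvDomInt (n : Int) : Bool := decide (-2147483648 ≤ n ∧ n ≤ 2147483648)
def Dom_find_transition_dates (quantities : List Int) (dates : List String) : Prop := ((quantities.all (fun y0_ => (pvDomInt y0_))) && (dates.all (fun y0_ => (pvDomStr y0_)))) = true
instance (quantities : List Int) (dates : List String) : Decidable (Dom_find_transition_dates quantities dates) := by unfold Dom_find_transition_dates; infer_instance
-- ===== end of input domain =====

-- B replaces A's boolean-flag state machine by three sequential phase scans over the
-- shared remainder of the zipped list (objective: simpler decomposition, same cost).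

-- ===== PORT A =====
-- literal port of A's single loop with flags; 'break' becomes returning the pair
def pvGoA : List (Int × String) → Option String → Bool → Bool → Option String × Option String
  | [], start_date, _, _ => (start_date, none)
  | (q, d) :: rest, start_date, has_positive, has_negative =>
    if q > 0 ∧ has_positive = false then
      pvGoA rest start_date true has_negative
    else if q < 0 ∧ has_positive = true ∧ has_negative = false then
      pvGoA rest (some d) has_positive true
    else if q > 0 ∧ has_positive = true ∧ has_negative = true then
      (start_date, some d)
    else
      pvGoA rest start_date has_positive has_negative

def find_transition_dates (quantities : List Int) (dates : List String) : Option String × Option String :=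
  pvGoA (quantities.zip dates) none false false

-- ===== PORT B =====
-- phase 1: consume up to and including the first positive quantity; none = no positive
def pvPhase1 : List (Int × String) → Option (List (Int × String))
  | [] => none
  | (q, _) :: rest => if q > 0 then some rest else pvPhase1 rest

-- phase 2: consume up to the first negative quantity, returning its date and the remainder
def pvPhase2 : List (Int × String) → Option (String × List (Int × String))
  | [] => none
  | (q, d) :: rest => if q < 0 then some (d, rest) else pvPhase2 rest

-- phase 3: date of the first positive quantity in the remainder, if any
def pvPhase3 : List (Int × String) → Option String
  | [] => none
  | (q, d) :: rest => if q > 0 then some d else pvPhase3 rest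

def find_transition_dates_alt (quantities : List Int) (dates : List String) : Option String × Option String :=
  match pvPhase1 (quantities.zip dates) with
  | none => (none, none)
  | some r1 =>
    match pvPhase2 r1 with
    | none => (none, none)
    | some (start_date, r2) => (some start_date, pvPhase3 r2)

-- ===== PRECONDITION & SPEC =====
def Spec_find_transition_dates (quantities : List Int) (dates : List String) (out : Option String × Option String) : Prop := out = find_transition_dates_alt quantities dates
instance (quantities : List Int) (dates : List String) (out : Option String × Option String) : Decidable (Spec_find_transition_dates quantities dates out) := by unfold Spec_find_transition_dates; infer_instance

-- ===== CLAIM (what is proved, stated in full; the proofs are below) =====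
def Claim_equal_find_transition_dates : Prop := ∀ (quantities : List Int) (dates : List String), Dom_find_transition_dates quantities dates → Spec_find_transition_dates quantities dates (find_transition_dates quantities dates)

-- ===== LEMMAS AND PROOFS =====

-- in state (hp = true, hn = true) A's loop just looks for the next positive: phase 3
theorem pvGoA_tt (l : List (Int × String)) (s : Option String) :
    pvGoA l s true true = (s, pvPhase3 l) := by
  induction l with
  | nil => simp [pvGoA, pvPhase3]
  | cons x rest ih =>
    obtain ⟨q, d⟩ := x
    by_cases hq : q > 0 <;> simp [pvGoA, pvPhase3, hq, ih]

-- in state (hp = true, hn = false) A's loop looks for the first negative: phase 2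
theorem pvGoA_tf (l : List (Int × String)) (s : Option String) :
    pvGoA l s true false =
      match pvPhase2 l with
      | none => (s, none)
      | some (d, r) => pvGoA r (some d) true true := by
  induction l with
  | nil => simp [pvGoA, pvPhase2]
  | cons x rest ih =>
    obtain ⟨q, d⟩ := x
    by_cases hq : q < 0 <;> simp [pvGoA, pvPhase2, hq, ih]

-- in the initial state A's loop looks for the first positive: phase 1
theorem pvGoA_ff (l : List (Int × String)) (s : Option String) :
    pvGoA l s false false =
      match pvPhase1 l with
      | none => (s, none)
      | some r => pvGoA r s true false := by
  induction l with
  | nil => simp [pvGoA, pvPhase1]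
  | cons x rest ih =>
    obtain ⟨q, d⟩ := x
    by_cases hq : q > 0 <;> simp [pvGoA, pvPhase1, hq, ih]

-- ===== VERDICT (by name: the statement is the Claim_ definition above) =====
theorem find_transition_dates_spec : Claim_equal_find_transition_dates := by
  intro quantities dates _
  unfold Spec_find_transition_dates find_transition_dates find_transition_dates_alt
  rw [pvGoA_ff]
  cases pvPhase1 (quantities.zip dates) with
  | none => rfl
  | some r1 =>
    simp only
    rw [pvGoA_tf]
    cases h2 : pvPhase2 r1 with
    | none => rfl
    | some p => obtain ⟨d, r2⟩ := p; simp [pvGoA_tt]
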